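-- pv_equiv track=rewrite | github.com/lantunes/dnbpy | dnbpy/tabular_TD_learner_2by2_archived.py | get_possible_states
-- ===== SOURCE A (Python) =====
-- def get_possible_states(current_state):
--     """
--     :param current_state: the current string_index as the state of the board
--     :return: List of all possible states that the model can make a transition to
--     """
--     zero_index = []
--     [zero_index.append(idx) for idx,val in enumerate(current_state) if val==0]
--
--     possible_states = []
--     for possible_index in zero_index:
--         state = list(current_state)
--         state[possible_index] = 1
--         possible_states.append(state)
--     return (possible_states)
-- ===== SOURCE B (Python) =====
-- def get_possible_states(current_state):
--     """
--     :param current_state: the current string_index as the state of the board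
--     :return: List of all possible states that the model can make a transition to
--     """
--     # Single forward pass building every successor simultaneously: each value
--     # seen is appended to all partially built successors, and every zero starts
--     # a new successor (the prefix so far with 1 in place of the zero).  No
--     # index table and no per-index rebuild of the whole state.
--     prefix = []
--     possible_states = []
--     for val in current_state:
--         for state in possible_states:
--             state.append(val)
--         if val == 0:
--             possible_states.append(prefix + [1])
--         prefix.append(val)
--     return possible_states
-- ===== Notes on version B (the rewrite author's own statement) =====
-- stated objective: alternative
-- what changed: Replaces A's two-phase indexed approach (collect zero indices via enumerate, then rebuild a full copy per index) with one forward pass that grows all successor states simultaneously: each value is appended to every partially built successor, and each zero starts a new successor from the running prefix with a one in place of the zero; no index table, no per-index rebuild.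
import Mathlib
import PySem

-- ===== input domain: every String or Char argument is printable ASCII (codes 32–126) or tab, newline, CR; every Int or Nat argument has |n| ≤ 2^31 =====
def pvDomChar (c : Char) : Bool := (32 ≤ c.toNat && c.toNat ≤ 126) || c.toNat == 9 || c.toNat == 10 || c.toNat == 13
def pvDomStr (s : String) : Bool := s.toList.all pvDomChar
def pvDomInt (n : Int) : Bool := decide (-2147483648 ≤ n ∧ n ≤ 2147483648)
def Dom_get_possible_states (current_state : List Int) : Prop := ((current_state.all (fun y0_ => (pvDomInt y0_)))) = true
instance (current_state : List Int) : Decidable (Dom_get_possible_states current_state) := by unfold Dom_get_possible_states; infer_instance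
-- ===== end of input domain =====

-- B replaces A's two-phase index-collection-then-rebuild with one forward pass that grows all successor states simultaneously (objective: alternative, same cost).


-- ===== PORT A =====
-- zero_index: collect the indices of zero entries; then rebuild a copy per index with state[idx] = 1.
def get_possible_states (current_state : List Int) : List (List Int) :=
  let zero_index : List Int :=
    (PySem.List.enumerate current_state 0).foldl
      (fun acc p => if p.2 == 0 then acc ++ [p.1] else acc) []
  zero_index.foldl
    (fun possible_states possible_index =>
      possible_states ++ [PySem.List.pySetD current_state possible_index 1]) []

-- ===== PORT B =====
-- loop body: append val to every partial successor, start a new one at a zero, extend the prefix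
def gpsStep (st : List Int × List (List Int)) (val : Int) : List Int × List (List Int) :=
  let extended := st.2.map (fun state => state ++ [val])
  let possible_states := if val == 0 then extended ++ [st.1 ++ [1]] else extended
  (st.1 ++ [val], possible_states)

def get_possible_states_alt (current_state : List Int) : List (List Int) :=
  (current_state.foldl gpsStep ([], [])).2

-- ===== PRECONDITION & SPEC =====
def Spec_get_possible_states (current_state : List Int) (out : List (List Int)) : Prop := out = get_possible_states_alt current_state
instance (current_state : List Int) (out : List (List Int)) : Decidable (Spec_get_possible_states current_state out) := by unfold Spec_get_possible_states; infer_instance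

-- ===== CLAIM (what is proved, stated in full; the proofs are below) =====
def Claim_equal_get_possible_states : Prop := ∀ (current_state : List Int), Dom_get_possible_states current_state → Spec_get_possible_states current_state (get_possible_states current_state)

-- ===== LEMMAS AND PROOFS =====

-- proof-only recursive characterisation of the set of successor states
def gpsRec : List Int → List (List Int)
  | [] => []
  | v :: t => (if v == 0 then [(1 : Int) :: t] else []) ++ (gpsRec t).map (fun s => v :: s)

-- shifting the start of enumerate shifts every index by one
theorem enumerate_succ {α : Type} (l : List α) (s : Int) :
    PySem.List.enumerate l (s + 1) = (PySem.List.enumerate l s).map (fun p => (p.1 + 1, p.2)) := by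
  induction l generalizing s with
  | nil => rfl
  | cons x xs ih =>
    simp [PySem.List.enumerate_cons, ih (s + 1)]

-- A's closed form over the zero entries of the enumeration
theorem get_possible_states_closed (cs : List Int) :
    get_possible_states cs =
      ((PySem.List.enumerate cs 0).filter (fun p => p.2 == 0)).map
        (fun p => PySem.List.pySetD cs p.1 1) := by
  unfold get_possible_states
  rw [PySem.List.foldl_append_if, PySem.List.foldl_append_singleton_eq_map,
    List.nil_append, List.nil_append, List.map_map]
  rfl

-- A equals the recursive characterisation
theorem get_possible_states_eq_rec (cs : List Int) :
    get_possible_states cs = gpsRec cs := by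
  rw [get_possible_states_closed]
  induction cs with
  | nil => rfl
  | cons h t ih =>
    rw [PySem.List.enumerate_cons, enumerate_succ t 0]
    rw [List.filter_cons, List.filter_map]
    have hpred : ((fun p : Int × Int => p.2 == 0) ∘ fun p : Int × Int => (p.1 + 1, p.2))
        = (fun p : Int × Int => p.2 == 0) := rfl
    rw [hpred]
    have hmap :
        (((PySem.List.enumerate t 0).filter (fun p => p.2 == 0)).map
            (fun p : Int × Int => (p.1 + 1, p.2))).map (fun p => PySem.List.pySetD (h :: t) p.1 1)
        = (((PySem.List.enumerate t 0).filter (fun p => p.2 == 0)).map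
            (fun p => PySem.List.pySetD t p.1 1)).map (fun s => h :: s) := by
      rw [List.map_map, List.map_map]
      apply List.map_congr_left
      intro p hp
      have hmem := List.mem_of_mem_filter hp
      rw [PySem.List.mem_enumerate_iff] at hmem
      obtain ⟨k, hk, rfl⟩ := hmem
      simp only [Function.comp, zero_add]
      have h1 : ((k : Int) + 1) = ((k + 1 : Nat) : Int) := by push_cast; ring
      rw [h1, PySem.List.pySetD_natCast, PySem.List.pySetD_natCast]
      simp [List.set]
    unfold gpsRec
    by_cases hh : h = 0
    · subst hh
      simp only [beq_self_eq_true, if_true, List.map_cons, hmap, ih]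
      have : PySem.List.pySetD ((0 : Int) :: t) (0 : Int) 1 = (1 : Int) :: t := by
        simp [PySem.List.pySetD_of_nonneg]
      simp [this]
    · have hb : (h == 0) = false := by simp [hh]
      rw [hb]
      simp only [Bool.false_eq_true, if_false, hmap, ih, List.nil_append]

-- B's loop invariant: existing partials get the rest appended; new states come from gpsRec under the prefix
theorem gps_loop_spec (cs : List Int) : ∀ (p : List Int) (ps : List (List Int)),
    (cs.foldl gpsStep (p, ps)).2
      = ps.map (fun s => s ++ cs) ++ (gpsRec cs).map (fun s => p ++ s) := by
  induction cs with
  | nil => intro p ps; simp [gpsRec]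
  | cons v t ih =>
    intro p ps
    rw [List.foldl_cons]
    have hstep : gpsStep (p, ps) v
        = (p ++ [v], if v == 0 then ps.map (fun s => s ++ [v]) ++ [p ++ [1]]
                     else ps.map (fun s => s ++ [v])) := rfl
    rw [hstep]
    unfold gpsRec
    by_cases hv : v = 0
    · subst hv
      rw [show ((0 : Int) == 0) = true from rfl]
      simp only [if_true]
      rw [ih]
      simp [List.map_map, Function.comp_def, List.append_assoc]
    · have hb : (v == 0) = false := by simp [hv]
      rw [hb]
      simp only [Bool.false_eq_true, if_false]
      rw [ih]
      simp [List.map_map, Function.comp_def, List.append_assoc]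

theorem get_possible_states_eq (cs : List Int) :
    get_possible_states cs = get_possible_states_alt cs := by
  rw [get_possible_states_eq_rec]
  unfold get_possible_states_alt
  rw [gps_loop_spec]
  simp

-- ===== VERDICT (by name: the statement is the Claim_ definition above) =====
theorem get_possible_states_spec : Claim_equal_get_possible_states := by
  intro cs _
  unfold Spec_get_possible_states
  rw [get_possible_states_eq]
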